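-- pv_equiv track=rewrite | github.com/JaviLunes/AdventCode2022 | src/aoc2022/day_25/tools.py | _reduce_slots
-- ===== SOURCE A (Python) =====
-- def _reduce_slots(slots: list[int]) -> list[int]:
--     """Make sure all slot values are lower than 2."""
--     slots = slots + [0]
--     while any(value > 2 for value in slots):
--         for i, value in enumerate(slots):
--             if value > 2:
--                 slots[i] = value - 5
--                 slots[i + 1] += 1
--     if slots[-1] == 0:
--         slots.pop(-1)
--     return slots
-- ===== SOURCE B (Python) =====
-- def _reduce_slots(slots: list[int]) -> list[int]:
--     """Make sure all slot values are lower than 2."""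
--     out = []
--     carry = 0
--     for value in slots:
--         total = value + carry
--         carry = max(0, (total + 2) // 5)
--         out.append(total - 5 * carry)
--     if carry:
--         out.append(carry)
--     return out
-- ===== Notes on version B (the rewrite author's own statement) =====
-- stated objective: faster
-- what changed: Replaces A's repeated whole-list relaxation passes (while any>2: sweep subtracting 5 and carrying) with a single low-to-high fold that computes each slot's carry directly as max(0, (value+carry+2)//5).
import Mathlib
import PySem

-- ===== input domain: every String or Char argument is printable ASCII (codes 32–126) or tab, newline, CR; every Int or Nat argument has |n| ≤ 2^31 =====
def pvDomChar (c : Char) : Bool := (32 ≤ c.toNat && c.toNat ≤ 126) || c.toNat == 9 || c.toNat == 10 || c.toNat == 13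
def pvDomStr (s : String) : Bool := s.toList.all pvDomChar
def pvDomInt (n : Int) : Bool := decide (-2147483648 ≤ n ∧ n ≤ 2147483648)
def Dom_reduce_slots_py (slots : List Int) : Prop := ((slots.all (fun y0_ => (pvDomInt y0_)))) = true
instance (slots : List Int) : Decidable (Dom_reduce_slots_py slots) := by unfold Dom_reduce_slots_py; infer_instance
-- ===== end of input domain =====

-- B replaces A's repeated whole-list relaxation passes by ONE low-to-high carry fold
-- (carry = max(0, (value+carry+2)//5)); same return value wherever A returns.

-- ===== PORT A =====
-- one pass of A's inner `for i, value in enumerate(slots)` loop: Python's enumerate reads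
-- the LIVE list, so the +1 carry written into slot i+1 is seen when the loop reaches it.
-- passAux carries the (possibly already incremented) current value v and the untouched rest;
-- the v > 2 branch of the [] case is where Python raises IndexError (excluded by Pre_):
-- the value returned there is irrelevant junk.
def passAux (v : Int) : List Int → List Int
  | [] => if v > 2 then [v - 5] else [v]
  | w :: rest => if v > 2 then (v - 5) :: passAux (w + 1) rest else v :: passAux w rest

def passA : List Int → List Int
  | [] => []
  | v :: rest => passAux v rest

-- termination measure for A's while loop: sum of the positive parts
def measA (l : List Int) : Nat := (l.map Int.toNat).sum

theorem measA_cons (v : Int) (l : List Int) : measA (v :: l) = v.toNat + measA l := by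
  simp [measA]

theorem passAux_measA_le : ∀ (rest : List Int) (v : Int),
    measA (passAux v rest) ≤ v.toNat + measA rest := by
  intro rest
  induction rest with
  | nil =>
      intro v
      by_cases h : v > 2
      · rw [show passAux v [] = [v - 5] by simp [passAux, h], measA_cons]
        omega
      · rw [show passAux v [] = [v] by simp [passAux, h], measA_cons]
  | cons w rest ih =>
      intro v
      by_cases h : v > 2
      · rw [show passAux v (w :: rest) = (v - 5) :: passAux (w + 1) rest by simp [passAux, h],
          measA_cons, measA_cons]
        have := ih (w + 1)
        omega
      · rw [show passAux v (w :: rest) = v :: passAux w rest by simp [passAux, h],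
          measA_cons, measA_cons]
        have := ih w
        omega

theorem passAux_measA_lt : ∀ (rest : List Int) (v : Int), (2 < v ∨ ∃ x ∈ rest, 2 < x) →
    measA (passAux v rest) < v.toNat + measA rest := by
  intro rest
  induction rest with
  | nil =>
      intro v hd
      have h : 2 < v := by
        rcases hd with h | ⟨x, hx, _⟩
        · exact h
        · simp at hx
      rw [show passAux v [] = [v - 5] by simp [passAux]; omega, measA_cons]
      simp [measA]
      omega
  | cons w rest ih =>
      intro v hd
      by_cases h : v > 2
      · rw [show passAux v (w :: rest) = (v - 5) :: passAux (w + 1) rest by simp [passAux, h],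
          measA_cons, measA_cons]
        have := passAux_measA_le rest (w + 1)
        omega
      · have hd' : 2 < w ∨ ∃ x ∈ rest, 2 < x := by
          rcases hd with hv | ⟨x, hx, hx2⟩
          · omega
          · rcases List.mem_cons.mp hx with h1 | h1
            · left; omega
            · right; exact ⟨x, h1, hx2⟩
        rw [show passAux v (w :: rest) = v :: passAux w rest by simp [passAux, h],
          measA_cons, measA_cons]
        have := ih w hd'
        omega

theorem passA_measA_lt (l : List Int) (hex : ∃ v ∈ l, v > 2) : measA (passA l) < measA l := by
  cases l with
  | nil => rcases hex with ⟨v, hv, _⟩; simp at hv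
  | cons v rest =>
      have hd : 2 < v ∨ ∃ x ∈ rest, 2 < x := by
        rcases hex with ⟨x, hx, hx2⟩
        rcases List.mem_cons.mp hx with h1 | h1
        · left; omega
        · right; exact ⟨x, h1, hx2⟩
      rw [show passA (v :: rest) = passAux v rest from rfl, measA_cons]
      exact passAux_measA_lt rest v hd

-- A's `while any(value > 2 for value in slots):` loop
def loopA (l : List Int) : List Int :=
  if _h : l.any (fun v => v > 2) then loopA (passA l) else l
termination_by measA l
decreasing_by
  exact passA_measA_lt l (by simpa using _h)

def reduce_slots_py (slots : List Int) : List Int :=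
  -- slots = slots + [0]
  let s := slots ++ [0]
  let r := loopA s
  -- if slots[-1] == 0: slots.pop(-1)
  if PySem.List.pyGet? r (-1) = some 0 then r.dropLast else r

-- ===== PORT B =====
def reduce_slots_py_alt (slots : List Int) : List Int :=
  let p := slots.foldl
    (fun (s : List Int × Int) value =>
      let total := value + s.2
      let carry := max 0 (PySem.Int.floordiv (total + 2) 5)
      (s.1 ++ [total - 5 * carry], carry))
    ([], 0)
  if p.2 ≠ 0 then p.1 ++ [p.2] else p.1

-- ===== PRECONDITION & SPEC =====
-- Pre_ excludes exactly the inputs on which A raises IndexError: those whose final carry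
-- out of the highest slot exceeds 2, so that the single appended slot overflows and
-- `slots[i + 1] += 1` is attempted past the end of the list.
def Pre_reduce_slots_py (slots : List Int) : Prop :=
  slots.foldl (fun c v => max 0 (PySem.Int.floordiv (v + c + 2) 5)) 0 ≤ 2

instance (slots : List Int) : Decidable (Pre_reduce_slots_py slots) := by
  unfold Pre_reduce_slots_py; infer_instance

def pvWitness_reduce_slots_py : List Int := [4, 4]

def Spec_reduce_slots_py (slots : List Int) (out : List Int) : Prop := out = reduce_slots_py_alt slots
instance (slots : List Int) (out : List Int) : Decidable (Spec_reduce_slots_py slots out) := by unfold Spec_reduce_slots_py; infer_instance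

-- ===== CLAIM (what is proved, stated in full; the proofs are below) =====
def Claim_equal_reduce_slots_py : Prop := ∀ (slots : List Int), Dom_reduce_slots_py slots → Pre_reduce_slots_py slots → Spec_reduce_slots_py slots (reduce_slots_py slots)

-- ===== LEMMAS AND PROOFS =====

-- canonical low-to-high carry normalisation (digits, with incoming carry c)…
def normF (c : Int) : List Int → List Int
  | [] => []
  | v :: tl =>
      let t := v + c
      let c' := max 0 (PySem.Int.floordiv (t + 2) 5)
      (t - 5 * c') :: normF c' tl

-- …and its carry out of the top
def coF (c : Int) : List Int → Int
  | [] => c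
  | v :: tl => coF (max 0 (PySem.Int.floordiv (v + c + 2) 5)) tl

-- floor-division by 5 is Euclidean division (5 > 0), so omega can reason about it
theorem fd5 (t : Int) : PySem.Int.floordiv t 5 = t / 5 :=
  PySem.Int.floordiv_eq_ediv_of_pos (by norm_num)

theorem foldl_eq_coF : ∀ (l : List Int) (c : Int),
    l.foldl (fun c v => max 0 (PySem.Int.floordiv (v + c + 2) 5)) c = coF c l := by
  intro l
  induction l with
  | nil => intro c; rfl
  | cons v tl ih => intro c; rw [List.foldl_cons]; exact ih _

theorem coF_nonneg : ∀ (l : List Int) (c : Int), 0 ≤ c → 0 ≤ coF c l := by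
  intro l
  induction l with
  | nil => intro c h; exact h
  | cons v tl ih => intro c _; exact ih _ (le_max_left _ _)

theorem normF_id : ∀ l : List Int, (∀ v ∈ l, v ≤ 2) → normF 0 l = l := by
  intro l
  induction l with
  | nil => intro _; rfl
  | cons v tl ih =>
      intro h
      have hv : v ≤ 2 := h v (List.mem_cons_self ..)
      have hc : max 0 (PySem.Int.floordiv (v + 0 + 2) 5) = 0 := by rw [fd5]; omega
      show (v + 0 - 5 * max 0 (PySem.Int.floordiv (v + 0 + 2) 5)) ::
          normF (max 0 (PySem.Int.floordiv (v + 0 + 2) 5)) tl = v :: tl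
      rw [hc, show v + 0 - 5 * 0 = v by ring,
        ih (fun x hx => h x (List.mem_cons_of_mem _ hx))]

theorem normF_append : ∀ (l₁ l₂ : List Int) (c : Int),
    normF c (l₁ ++ l₂) = normF c l₁ ++ normF (coF c l₁) l₂ ∧
    coF c (l₁ ++ l₂) = coF (coF c l₁) l₂ := by
  intro l₁
  induction l₁ with
  | nil => intro l₂ c; exact ⟨rfl, rfl⟩
  | cons v tl ih =>
      intro l₂ c
      refine ⟨?_, (ih l₂ _).2⟩
      show (v + c - 5 * max 0 (PySem.Int.floordiv (v + c + 2) 5)) ::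
          normF (max 0 (PySem.Int.floordiv (v + c + 2) 5)) (tl ++ l₂) = _
      rw [(ih l₂ _).1]
      rfl

-- shifting one unit of carry from the incoming carry into the head value
theorem normF_shift (w : Int) (rest : List Int) (c : Int) :
    normF c ((w + 1) :: rest) = normF (c + 1) (w :: rest) ∧
    coF c ((w + 1) :: rest) = coF (c + 1) (w :: rest) := by
  constructor
  · show (w + 1 + c - 5 * max 0 (PySem.Int.floordiv (w + 1 + c + 2) 5)) ::
        normF (max 0 (PySem.Int.floordiv (w + 1 + c + 2) 5)) rest = _
    rw [show w + 1 + c = w + (c + 1) by ring]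
    rfl
  · show coF (max 0 (PySem.Int.floordiv (w + 1 + c + 2) 5)) rest = _
    rw [show w + 1 + c = w + (c + 1) by ring]
    rfl

-- the key invariant: one live pass of A's inner loop does not change the normal form,
-- provided the incoming carry is nonnegative and no carry escapes the top
theorem passAux_invariant : ∀ (rest : List Int) (v c : Int), 0 ≤ c → coF c (v :: rest) = 0 →
    normF c (passAux v rest) = normF c (v :: rest) ∧ coF c (passAux v rest) = 0 := by
  intro rest
  induction rest with
  | nil =>
      intro v c hc h0
      by_cases h : v > 2
      · -- [v] with v > 2: the carry out is ≥ 1, contradicting coF c [v] = 0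
        exfalso
        have h0' : max 0 (PySem.Int.floordiv (v + c + 2) 5) = 0 := h0
        rw [fd5] at h0'
        omega
      · rw [show passAux v [] = [v] by simp [passAux, h]]
        exact ⟨rfl, h0⟩
  | cons w rest ih =>
      intro v c hc h0
      by_cases h : v > 2
      · have hsplit : max 0 (PySem.Int.floordiv (v + c + 2) 5)
            = max 0 (PySem.Int.floordiv (v - 5 + c + 2) 5) + 1 := by
          rw [fd5, fd5]; omega
        have h0' : coF (max 0 (PySem.Int.floordiv (v + c + 2) 5)) (w :: rest) = 0 := h0
        have hshift : coF (max 0 (PySem.Int.floordiv (v - 5 + c + 2) 5)) ((w + 1) :: rest)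
            = coF (max 0 (PySem.Int.floordiv (v + c + 2) 5)) (w :: rest) := by
          rw [(normF_shift w rest _).2, ← hsplit]
        have ihr := ih (w + 1) (max 0 (PySem.Int.floordiv (v - 5 + c + 2) 5)) (le_max_left _ _)
          (by rw [hshift]; exact h0')
        rw [show passAux v (w :: rest) = (v - 5) :: passAux (w + 1) rest by simp [passAux, h]]
        refine ⟨?_, ?_⟩
        · show (v - 5 + c - 5 * max 0 (PySem.Int.floordiv (v - 5 + c + 2) 5)) ::
              normF (max 0 (PySem.Int.floordiv (v - 5 + c + 2) 5)) (passAux (w + 1) rest)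
              = (v + c - 5 * max 0 (PySem.Int.floordiv (v + c + 2) 5)) ::
                normF (max 0 (PySem.Int.floordiv (v + c + 2) 5)) (w :: rest)
          rw [ihr.1, (normF_shift w rest _).1, ← hsplit,
            show v - 5 + c - 5 * max 0 (PySem.Int.floordiv (v - 5 + c + 2) 5)
              = v + c - 5 * max 0 (PySem.Int.floordiv (v + c + 2) 5) by rw [hsplit]; ring]
        · show coF (max 0 (PySem.Int.floordiv (v - 5 + c + 2) 5)) (passAux (w + 1) rest) = 0
          exact ihr.2
      · have h0' : coF (max 0 (PySem.Int.floordiv (v + c + 2) 5)) (w :: rest) = 0 := h0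
        have ihr := ih w (max 0 (PySem.Int.floordiv (v + c + 2) 5)) (le_max_left _ _) h0'
        rw [show passAux v (w :: rest) = v :: passAux w rest by simp [passAux, h]]
        refine ⟨?_, ?_⟩
        · show (v + c - 5 * max 0 (PySem.Int.floordiv (v + c + 2) 5)) ::
              normF (max 0 (PySem.Int.floordiv (v + c + 2) 5)) (passAux w rest)
              = (v + c - 5 * max 0 (PySem.Int.floordiv (v + c + 2) 5)) ::
                normF (max 0 (PySem.Int.floordiv (v + c + 2) 5)) (w :: rest)
          rw [ihr.1]
        · show coF (max 0 (PySem.Int.floordiv (v + c + 2) 5)) (passAux w rest) = 0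
          exact ihr.2

theorem passA_invariant (l : List Int) (c : Int) (hc : 0 ≤ c) (h0 : coF c l = 0) :
    normF c (passA l) = normF c l ∧ coF c (passA l) = 0 := by
  cases l with
  | nil => exact ⟨rfl, h0⟩
  | cons v rest => exact passAux_invariant rest v c hc h0

theorem loopA_eq_normF_aux : ∀ (n : Nat) (l : List Int), measA l < n → coF 0 l = 0 →
    loopA l = normF 0 l := by
  intro n
  induction n with
  | zero => intro l hle; exact absurd hle (Nat.not_lt_zero _)
  | succ n ih =>
      intro l hle h0
      rw [loopA]
      split
      · next hany =>
          have hex : ∃ v ∈ l, v > 2 := by simpa using hany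
          have hlt := passA_measA_lt l hex
          have hinv := passA_invariant l 0 le_rfl h0
          rw [ih (passA l) (by omega) hinv.2, hinv.1]
      · next hany =>
          have hall : ∀ v ∈ l, v ≤ 2 := by
            intro v hv
            by_contra hgt
            exact hany (List.any_eq_true.mpr ⟨v, hv, by simpa using hgt⟩)
          rw [normF_id l hall]

theorem loopA_eq_normF (l : List Int) (h0 : coF 0 l = 0) : loopA l = normF 0 l :=
  loopA_eq_normF_aux (measA l + 1) l (Nat.lt_succ_self _) h0

-- B's fold builds exactly (acc ++ normF c l, coF c l)
theorem foldB_eq : ∀ (l : List Int) (acc : List Int) (c : Int),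
    l.foldl
      (fun (s : List Int × Int) value =>
        let total := value + s.2
        let carry := max 0 (PySem.Int.floordiv (total + 2) 5)
        (s.1 ++ [total - 5 * carry], carry))
      (acc, c) = (acc ++ normF c l, coF c l) := by
  intro l
  induction l with
  | nil => intro acc c; simp [normF, coF]
  | cons v tl ih =>
      intro acc c
      rw [List.foldl_cons,
        show normF c (v :: tl)
          = (v + c - 5 * max 0 (PySem.Int.floordiv (v + c + 2) 5)) ::
            normF (max 0 (PySem.Int.floordiv (v + c + 2) 5)) tl from rfl,
        show coF c (v :: tl) = coF (max 0 (PySem.Int.floordiv (v + c + 2) 5)) tl from rfl]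
      refine (ih (acc ++ [v + c - 5 * max 0 (PySem.Int.floordiv (v + c + 2) 5)])
        (max 0 (PySem.Int.floordiv (v + c + 2) 5))).trans ?_
      rw [List.append_assoc, List.singleton_append]

-- ===== VERDICT (by name: the statement is the Claim_ definition above) =====
theorem reduce_slots_py_spec : Claim_equal_reduce_slots_py := by
  intro slots _ hpre
  unfold Pre_reduce_slots_py at hpre
  rw [foldl_eq_coF] at hpre
  have hc0 : 0 ≤ coF 0 slots := coF_nonneg slots 0 le_rfl
  have hco : coF 0 (slots ++ [0]) = 0 := by
    rw [(normF_append slots [0] 0).2]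
    show max 0 (PySem.Int.floordiv (0 + coF 0 slots + 2) 5) = 0
    rw [fd5]
    omega
  have hnorm : normF 0 (slots ++ [0]) = normF 0 slots ++ [coF 0 slots] := by
    rw [(normF_append slots [0] 0).1]
    show normF 0 slots ++ (0 + coF 0 slots
        - 5 * max 0 (PySem.Int.floordiv (0 + coF 0 slots + 2) 5)) :: normF _ [] = _
    rw [show max 0 (PySem.Int.floordiv (0 + coF 0 slots + 2) 5) = 0 by rw [fd5]; omega]
    rw [show 0 + coF 0 slots - 5 * 0 = coF 0 slots by ring]
    rfl
  simp only [Spec_reduce_slots_py, reduce_slots_py, reduce_slots_py_alt]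
  rw [foldB_eq, loopA_eq_normF _ hco, hnorm]
  simp only [List.nil_append]
  rw [PySem.List.pyGet?_neg_one_append_singleton]
  by_cases h0 : coF 0 slots = 0
  · simp [h0]
  · simp [h0]
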